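-- pv_equiv track=rewrite | github.com/bobertoyin/adventofcobra | solutions/s2015.py | score_arrangement
-- ===== SOURCE A (Python) =====
-- def score_arrangement(arr: list[str], rels: dict[str, dict[str, int]]) -> int:
--     score = 0
--     for index, person in enumerate(arr):
--         left = index - 1 if index > 0 else len(arr) - 1
--         right = index + 1 if index < len(arr) - 1 else 0
--         score += rels[person][arr[left]]
--         score += rels[person][arr[right]]
--     return score
-- ===== SOURCE B (Python) =====
-- def score_arrangement(arr: list[str], rels: dict[str, dict[str, int]]) -> int:
--     # Stage 1: tally how many times each directed neighbour pair occurs around the circle.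
--     n = len(arr)
--     cnt = {}
--     for i in range(n):
--         person = arr[i]
--         for nb in (arr[i - 1], arr[(i + 1) % n]):
--             key = (person, nb)
--             cnt[key] = cnt.get(key, 0) + 1
--     # Stage 2: one lookup per distinct pair, weighted by its tally.
--     total = 0
--     for (a, b), c in cnt.items():
--         total += rels[a][b] * c
--     return total
-- ===== Notes on version B (the rewrite author's own statement) =====
-- stated objective: alternative
-- what changed: B replaces A's per-person neighbour lookups with two staged passes: it first builds a frequency dict of directed adjacent pairs around the circle, then does one rels lookup per distinct pair, weighted by its tally.
import Mathlib
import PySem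

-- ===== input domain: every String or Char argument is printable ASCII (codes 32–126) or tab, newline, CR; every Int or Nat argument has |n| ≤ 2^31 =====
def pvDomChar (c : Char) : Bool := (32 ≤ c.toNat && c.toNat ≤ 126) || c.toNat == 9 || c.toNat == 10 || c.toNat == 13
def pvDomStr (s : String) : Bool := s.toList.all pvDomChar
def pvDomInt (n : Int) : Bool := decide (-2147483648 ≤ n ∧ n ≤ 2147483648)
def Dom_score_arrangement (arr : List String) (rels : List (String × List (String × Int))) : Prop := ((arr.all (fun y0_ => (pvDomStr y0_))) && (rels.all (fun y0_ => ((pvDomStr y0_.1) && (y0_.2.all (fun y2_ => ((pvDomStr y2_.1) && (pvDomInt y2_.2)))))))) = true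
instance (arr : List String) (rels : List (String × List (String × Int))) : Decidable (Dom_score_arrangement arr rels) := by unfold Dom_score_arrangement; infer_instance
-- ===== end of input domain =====

-- B restates the circular-happiness total as two staged passes (tally the directed adjacent pairs,
-- then one rels lookup per distinct pair weighted by its tally) instead of A's per-person lookups.

-- shared helper: rels[a][b] as a total function (Pre_ guarantees the keys A needs are present)
def pvLook (rels : List (String × List (String × Int))) (a b : String) : Int :=
  PySem.Dict.getD (PySem.Dict.mk ((PySem.Dict.mk rels).getD a [])) b 0

-- ===== PORT A =====
-- per-person loop over enumerate(arr): add rels[person][arr[left]] + rels[person][arr[right]]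
def score_arrangement (arr : List String) (rels : List (String × List (String × Int))) : Int :=
  (PySem.List.enumerate arr).foldl
    (fun score ip =>
      let index : Int := ip.1
      let person : String := ip.2
      let left : Int := if index > 0 then index - 1 else (arr.length : Int) - 1
      let right : Int := if index < (arr.length : Int) - 1 then index + 1 else 0
      score + pvLook rels person (PySem.List.pyGetD arr left "")
            + pvLook rels person (PySem.List.pyGetD arr right ""))
    0

-- ===== PORT B =====
-- stage 1: cnt = frequency dict of directed adjacent pairs (arr[i], arr[i-1]) and (arr[i], arr[(i+1)%n]);
-- stage 2: total = sum over cnt.items() of rels[a][b] * c (one lookup per distinct pair)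
def score_arrangement_alt (arr : List String) (rels : List (String × List (String × Int))) : Int :=
  let n : Int := (arr.length : Int)
  let cnt : PySem.Dict (String × String) Int :=
    (PySem.List.pyRange 0 n 1).foldl
      (fun d i =>
        let person := PySem.List.pyGetD arr i ""
        [PySem.List.pyGetD arr (i - 1) "", PySem.List.pyGetD arr (PySem.Int.mod (i + 1) n) ""].foldl
          (fun d nb => d.insert (person, nb) (d.getD (person, nb) 0 + 1)) d)
      PySem.Dict.empty
  cnt.items.foldl (fun total kv => total + pvLook rels kv.1.1 kv.1.2 * kv.2) 0

-- ===== PRECONDITION & SPEC =====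
-- key present as Bool: rels has key a and rels[a] has key b
def pvHas (rels : List (String × List (String × Int))) (a b : String) : Bool :=
  match (PySem.Dict.mk rels).get? a with
  | none => false
  | some d => ((PySem.Dict.mk d).get? b).isSome

-- Pre_ excludes exactly the inputs on which the Python raises KeyError: for every circular
-- adjacent pair (a, b) of arr, rels[a][b] and rels[b][a] must exist.
def Pre_score_arrangement (arr : List String) (rels : List (String × List (String × Int))) : Prop :=
  ((arr.zip (arr.drop 1 ++ arr.take 1)).all
    (fun p => pvHas rels p.1 p.2 && pvHas rels p.2 p.1)) = true
instance (arr : List String) (rels : List (String × List (String × Int))) : Decidable (Pre_score_arrangement arr rels) := by unfold Pre_score_arrangement; infer_instance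

def pvWitness_score_arrangement : List String × (List (String × List (String × Int))) :=
  (["a", "b"], [("a", [("b", 5)]), ("b", [("a", -3)])])

def Spec_score_arrangement (arr : List String) (rels : List (String × List (String × Int))) (out : Int) : Prop := out = score_arrangement_alt arr rels
instance (arr : List String) (rels : List (String × List (String × Int))) (out : Int) : Decidable (Spec_score_arrangement arr rels out) := by unfold Spec_score_arrangement; infer_instance

-- ===== CLAIM (what is proved, stated in full; the proofs are below) =====
def Claim_equal_score_arrangement : Prop := ∀ (arr : List String) (rels : List (String × List (String × Int))), Dom_score_arrangement arr rels → Pre_score_arrangement arr rels → Spec_score_arrangement arr rels (score_arrangement arr rels)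

-- ===== LEMMAS AND PROOFS =====

-- abbreviations used only in the proofs
def pvA (arr : List String) (k : ℕ) : String := arr.getD k ""

-- the multiset of directed adjacent pairs A looks up (per index: (person, left), (person, right))
def pvPairs (arr : List String) : List (String × String) :=
  (List.range arr.length).flatMap (fun k =>
    [(pvA arr k, pvA arr (if 0 < k then k - 1 else arr.length - 1)),
     (pvA arr k, pvA arr (if k < arr.length - 1 then k + 1 else 0))])

-- fold that adds two contributions per element = sum of the two mapped lists
theorem pvFoldl_add2 {α : Type} (g1 g2 : α → Int) (l : List α) (a : Int) :
    l.foldl (fun s x => s + g1 x + g2 x) a = a + (l.map g1).sum + (l.map g2).sum := by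
  induction l generalizing a with
  | nil => simp
  | cons x xs ih => simp [ih]; ring

theorem pvFoldl_add1 {α : Type} (g : α → Int) (l : List α) (a : Int) :
    l.foldl (fun s x => s + g x) a = a + (l.map g).sum := by
  induction l generalizing a with
  | nil => simp
  | cons x xs ih => simp [ih]; ring

theorem pvSum_map_enumerate (xs : List String) (G : Int × String → Int) (s : Int) :
    ((PySem.List.enumerate xs s).map G).sum
      = ((List.range xs.length).map (fun (k : ℕ) => G (s + (k : Int), xs.getD k ""))).sum := by
  induction xs generalizing s with
  | nil => simp [PySem.List.enumerate_nil]
  | cons x xs ih =>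
    rw [PySem.List.enumerate_cons]
    simp only [List.map_cons, List.sum_cons, List.length_cons, List.range_succ_eq_map,
      List.map_map, ih]
    congr 1
    · simp
    · congr 1
      apply List.map_congr_left
      intro k _
      simp only [Function.comp, List.getD_cons_succ]
      have : s + 1 + (k : Int) = s + ((k + 1 : ℕ) : Int) := by push_cast; ring
      rw [this]

-- sum over a two-element-block flatMap splits into the two per-index sums
theorem pvSum_flat2 {α : Type} (l : List ℕ) (f g : ℕ → α) (h : α → Int) :
    ((l.flatMap (fun k => [f k, g k])).map h).sum
      = (l.map (fun k => h (f k))).sum + (l.map (fun k => h (g k))).sum := by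
  induction l with
  | nil => simp
  | cons x xs ih => simp [ih]; ring

-- A as the sum of lookups over pvPairs
theorem pvA_sum (arr : List String) (rels : List (String × List (String × Int))) :
    score_arrangement arr rels = ((pvPairs arr).map (fun p => pvLook rels p.1 p.2)).sum := by
  unfold score_arrangement pvPairs
  rw [pvFoldl_add2, pvSum_map_enumerate, pvSum_map_enumerate, pvSum_flat2, zero_add]
  congr 1
  · congr 1
    apply List.map_congr_left
    intro k hk
    rw [List.mem_range] at hk
    dsimp only
    congr 1
    by_cases h : 0 < k
    · rw [if_pos (by omega), if_pos h]
      have : (0 : Int) + (k : Int) - 1 = ((k - 1 : ℕ) : Int) := by omega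
      rw [this, PySem.List.pyGetD_natCast]
      rfl
    · have hk0 : k = 0 := by omega
      subst hk0
      rw [if_neg (by norm_num), if_neg (by norm_num)]
      have : (arr.length : Int) - 1 = ((arr.length - 1 : ℕ) : Int) := by omega
      rw [this, PySem.List.pyGetD_natCast]
      rfl
  · congr 1
    apply List.map_congr_left
    intro k hk
    rw [List.mem_range] at hk
    dsimp only
    congr 1
    by_cases h : k < arr.length - 1
    · rw [if_pos (by omega), if_pos h]
      have : (0 : Int) + (k : Int) + 1 = ((k + 1 : ℕ) : Int) := by omega
      rw [this, PySem.List.pyGetD_natCast]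
      rfl
    · rw [if_neg (by omega), if_neg h]
      have : (0 : Int) = ((0 : ℕ) : Int) := rfl
      rw [this, PySem.List.pyGetD_natCast]
      rfl

-- arr[-1] is the last element
theorem pvGetD_neg_one (xs : List String) (h : xs ≠ []) (d : String) :
    PySem.List.pyGetD xs (-1) d = xs.getD (xs.length - 1) d := by
  have h1 : 1 ≤ xs.length := by cases xs <;> simp_all
  simp [PySem.List.pyGetD, PySem.List.pyGet?, PySem.List.pyIdx?, h1, List.getD_eq_getElem?_getD]

-- congruence for flatMap over the same index list
theorem pvFlatMap_congr {α β : Type} (l : List α) (f g : α → List β)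
    (h : ∀ a ∈ l, f a = g a) : l.flatMap f = l.flatMap g := by
  induction l with
  | nil => rfl
  | cons x xs ih => simp only [List.flatMap_cons, h x (by simp), ih (fun a ha => h a (by simp [ha]))]

-- a loop that inserts two counted pairs per index = the counting fold over the flattened pair list
theorem pvFoldl_pairs {ι : Type} (l : List ι) (P : ι → String) (n1 n2 : ι → String)
    (d : PySem.Dict (String × String) Int) :
    l.foldl (fun d i =>
        [n1 i, n2 i].foldl (fun d nb => d.insert (P i, nb) (d.getD (P i, nb) 0 + 1)) d) d
      = (l.flatMap (fun i => [(P i, n1 i), (P i, n2 i)])).foldl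
          (fun d x => d.insert x (d.getD x 0 + 1)) d := by
  induction l generalizing d with
  | nil => rfl
  | cons x xs ih => rw [List.foldl_cons, ih, List.flatMap_cons, List.foldl_append]; rfl

-- the pair list B's counting loop walks is exactly pvPairs
theorem pvLoopPairs_eq (arr : List String) :
    (PySem.List.pyRange 0 (arr.length : Int) 1).flatMap (fun i =>
      [(PySem.List.pyGetD arr i "", PySem.List.pyGetD arr (i - 1) ""),
       (PySem.List.pyGetD arr i "", PySem.List.pyGetD arr (PySem.Int.mod (i + 1) (arr.length : Int)) "")])
      = pvPairs arr := by
  unfold pvPairs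
  rw [PySem.List.pyRange_one]
  simp only [sub_zero, Int.toNat_natCast, List.flatMap_map, zero_add]
  apply pvFlatMap_congr
  intro k hk
  rw [List.mem_range] at hk
  have hne : arr ≠ [] := by intro h; subst h; simp at hk
  have e0 : PySem.List.pyGetD arr (k : Int) "" = pvA arr k := PySem.List.pyGetD_natCast arr k ""
  have eL : PySem.List.pyGetD arr ((k : Int) - 1) ""
      = pvA arr (if 0 < k then k - 1 else arr.length - 1) := by
    by_cases h : 0 < k
    · rw [if_pos h]
      have : (k : Int) - 1 = ((k - 1 : ℕ) : Int) := by omega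
      rw [this]; exact PySem.List.pyGetD_natCast arr (k - 1) ""
    · have hk0 : k = 0 := by omega
      subst hk0
      rw [if_neg (by omega)]
      have : ((0 : ℕ) : Int) - 1 = -1 := by norm_num
      rw [this, pvGetD_neg_one arr hne]; rfl
  have eR : PySem.List.pyGetD arr (PySem.Int.mod ((k : Int) + 1) (arr.length : Int)) ""
      = pvA arr (if k < arr.length - 1 then k + 1 else 0) := by
    have h1 : (k : Int) + 1 = ((k + 1 : ℕ) : Int) := by push_cast; ring
    rw [h1, PySem.Int.mod_natCast]
    by_cases h : k < arr.length - 1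
    · rw [if_pos h, Nat.mod_eq_of_lt (by omega)]
      exact PySem.List.pyGetD_natCast arr (k + 1) ""
    · rw [if_neg h]
      have h2 : k + 1 = arr.length := by omega
      rw [h2, Nat.mod_self]
      exact PySem.List.pyGetD_natCast arr 0 ""
  rw [e0, eL, eR]

-- cnt built by B's stage 1 is the counter of pvPairs
theorem pvCnt_eq (arr : List String) :
    (PySem.List.pyRange 0 (arr.length : Int) 1).foldl
      (fun d i =>
        let person := PySem.List.pyGetD arr i ""
        [PySem.List.pyGetD arr (i - 1) "", PySem.List.pyGetD arr (PySem.Int.mod (i + 1) (arr.length : Int)) ""].foldl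
          (fun d nb => d.insert (person, nb) (d.getD (person, nb) 0 + 1)) d)
      (PySem.Dict.empty : PySem.Dict (String × String) Int)
    = PySem.Dict.counter (pvPairs arr) := by
  rw [pvFoldl_pairs, pvLoopPairs_eq, PySem.Dict.foldl_insert_getD_add_one_eq_counter]

-- the two lawful BEq instances on pairs count alike
theorem pvCount_beq (L : List (String × String)) (x : String × String) :
    @List.count (String × String) instBEqProd x L
      = @List.count (String × String) instBEqOfDecidableEq x L := by
  induction L with
  | nil => rfl
  | cons b t ih =>
    rw [@List.count_cons _ instBEqProd, @List.count_cons _ instBEqOfDecidableEq, ih]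
    by_cases h : b = x <;> simp [h]

-- summing over the distinct elements weighted by multiplicity = summing over the list
theorem pvSum_count (L : List (String × String)) (f : String × String → Int) :
    ((PySem.Set.ofList L).map (fun k => f k * (L.count k : Int))).sum = (L.map f).sum := by
  have hfs : (PySem.Set.ofList L).toFinset = L.toFinset := by
    apply Finset.ext
    intro x
    simp [List.mem_toFinset, PySem.Set.mem_ofList]
  have h1 : ((PySem.Set.ofList L).map (fun k => f k * (L.count k : Int))).sum
      = ∑ x ∈ L.toFinset, f x * (L.count x : Int) := by
    rw [← hfs, List.sum_toFinset _ (PySem.Set.nodup_ofList L)]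
  rw [h1, Finset.sum_list_map_count L f]
  apply Finset.sum_congr rfl
  intro x _
  rw [nsmul_eq_mul, mul_comm]
  rw [pvCount_beq]

-- ===== VERDICT (by name: the statement is the Claim_ definition above) =====
theorem score_arrangement_spec : Claim_equal_score_arrangement := by
  intro arr rels _ _
  unfold Spec_score_arrangement score_arrangement_alt
  simp only [pvCnt_eq, PySem.Dict.items_counter]
  rw [pvFoldl_add1, zero_add, List.map_map]
  have : ((fun kv : (String × String) × Int => pvLook rels kv.1.1 kv.1.2 * kv.2) ∘
      (fun k => (k, ((pvPairs arr).count k : Int))))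
      = fun k => pvLook rels k.1 k.2 * ((pvPairs arr).count k : Int) := rfl
  rw [this, pvSum_count (pvPairs arr) (fun p => pvLook rels p.1 p.2), ← pvA_sum]
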